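-- pv_equiv track=rewrite | github.com/VictorRiveraT/Simulaci-n-Algoritmia | AlgoritmiaInterpreter.py | convert_to_lilypond
-- ===== SOURCE A (Python) =====
-- NOTE_MAP = {
--     'A0': 0, 'B0': 1, 'C1': 2, 'D1': 3, 'E1': 4, 'F1': 5, 'G1': 6, 'A1': 7, 'B1': 8,
--     'C2': 9, 'D2': 10, 'E2': 11, 'F2': 12, 'G2': 13, 'A2': 14, 'B2': 15,
--     'C3': 16, 'D3': 17, 'E3': 18, 'F3': 19, 'G3': 20, 'A3': 21, 'B3': 22,
--     'C4': 23, 'D4': 24, 'E4': 25, 'F4': 26, 'G4': 27, 'A4': 28, 'B4': 29,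
--     'C5': 30, 'D5': 31, 'E5': 32, 'F5': 33, 'G5': 34, 'A5': 35, 'B5': 36,
--     'C6': 37, 'D6': 38, 'E6': 39, 'F6': 40, 'G6': 41, 'A6': 42, 'B6': 43,
--     'C7': 44, 'D7': 45, 'E7': 46, 'F7': 47, 'G7': 48, 'A7': 49, 'B7': 50,
--     'C8': 51
-- }
--
-- def convert_to_lilypond(pitch_val, duration_val):
--     if pitch_val < 0 or pitch_val > 51: return f"r{duration_val}"
--     note_name = None
--     for name, val in NOTE_MAP.items():
--         if val == pitch_val and name[-1].isdigit():
--             note_name = name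
--             break
--     if note_name is None: return f"r{duration_val}"
--
--     letter = note_name[0].lower()
--     octave = int(note_name[1:])
--     octave_suffix = {0: ",,,", 1: ",,", 2: ",", 3: "", 4: "'", 5: "''", 6: "'''", 7: "''''", 8: "'''''"}
--     return f"{letter}{octave_suffix.get(octave, '')}{duration_val}"
-- ===== SOURCE B (Python) =====
-- def convert_to_lilypond(pitch_val, duration_val):
--     if pitch_val < 0 or pitch_val > 51:
--         return f"r{duration_val}"
--     letter = "abcdefg"[pitch_val % 7]
--     octave = (pitch_val + 5) // 7
--     suffix = "," * (3 - octave) if octave < 3 else "'" * (octave - 3)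
--     return f"{letter}{suffix}{duration_val}"
-- ===== Notes on version B (the rewrite author's own statement) =====
-- stated objective: simpler
-- what changed: Replaced the linear scan over the 52-entry NOTE_MAP dict (plus string parsing of the found name's letter and octave) by direct arithmetic: letter = "abcdefg"[pitch_val % 7], octave = (pitch_val + 5) // 7, with the suffix built by string repetition; no loop or table remains.
import Mathlib
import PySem

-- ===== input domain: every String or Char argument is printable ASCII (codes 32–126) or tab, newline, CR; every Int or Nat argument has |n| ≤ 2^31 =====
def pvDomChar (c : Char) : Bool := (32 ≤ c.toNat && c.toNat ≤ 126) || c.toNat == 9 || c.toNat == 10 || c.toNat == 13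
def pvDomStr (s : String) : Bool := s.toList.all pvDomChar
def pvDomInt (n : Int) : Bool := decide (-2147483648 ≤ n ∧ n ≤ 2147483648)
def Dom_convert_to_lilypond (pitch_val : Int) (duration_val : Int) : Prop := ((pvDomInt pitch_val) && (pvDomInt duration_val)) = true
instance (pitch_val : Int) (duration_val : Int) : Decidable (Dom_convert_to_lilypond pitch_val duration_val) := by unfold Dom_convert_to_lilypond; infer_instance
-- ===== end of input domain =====

-- B replaces A's linear scan of the 52-entry NOTE_MAP (plus string parsing of the found name)
-- by direct arithmetic: letter = "abcdefg"[pitch % 7], octave = (pitch + 5) // 7, suffix by repetition.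

-- ===== PORT A =====
-- NOTE_MAP: the module-level dict, as an insertion-ordered association list.
def pvNOTE_MAP : List (String × Int) :=
  [("A0", 0), ("B0", 1), ("C1", 2), ("D1", 3), ("E1", 4), ("F1", 5), ("G1", 6), ("A1", 7), ("B1", 8), ("C2", 9), ("D2", 10), ("E2", 11), ("F2", 12), ("G2", 13), ("A2", 14), ("B2", 15), ("C3", 16), ("D3", 17), ("E3", 18), ("F3", 19), ("G3", 20), ("A3", 21), ("B3", 22), ("C4", 23), ("D4", 24), ("E4", 25), ("F4", 26), ("G4", 27), ("A4", 28), ("B4", 29), ("C5", 30), ("D5", 31), ("E5", 32), ("F5", 33), ("G5", 34), ("A5", 35), ("B5", 36), ("C6", 37), ("D6", 38), ("E6", 39), ("F6", 40), ("G6", 41), ("A6", 42), ("B6", 43), ("C7", 44), ("D7", 45), ("E7", 46), ("F7", 47), ("G7", 48), ("A7", 49), ("B7", 50), ("C8", 51)]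

-- the 'for name, val in NOTE_MAP.items(): … break' loop: first name with val == pitch and name[-1].isdigit()
def pvFindNote : List (String × Int) → Int → Option String
  | [], _ => none
  | (name, v) :: rest, p =>
    -- name[-1].isdigit(); names here are never empty, so the 'none' arm is unreachable
    if v = p ∧ ((PySem.Str.pyGet? name (-1)).elim false PySem.Chars.isdigit) = true then some name
    else pvFindNote rest p

def pvOctaveSuffix : PySem.Dict Int String :=
  PySem.Dict.ofList [(0, ",,,"), (1, ",,"), (2, ","), (3, ""), (4, "'"), (5, "''"), (6, "'''"), (7, "''''"), (8, "'''''")]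

def convert_to_lilypond (pitch_val : Int) (duration_val : Int) : String :=
  if pitch_val < 0 ∨ pitch_val > 51 then "r" ++ PySem.Int.toStr duration_val
  else
    match pvFindNote pvNOTE_MAP pitch_val with
    | none => "r" ++ PySem.Int.toStr duration_val
    | some name =>
      -- name[0].lower(); the found name is nonempty, so the 'none' arm is unreachable
      let letter : String := match PySem.Str.pyGet? name 0 with
        | some c => String.ofList [PySem.Chars.lowerChar c]
        | none => ""
      -- int(name[1:]); the digit suffix always parses, so getD's default is unreachable
      let octave : Int := (PySem.Int.ofStr? (PySem.Str.slice name (some 1) none)).getD 0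
      letter ++ PySem.Dict.getD pvOctaveSuffix octave "" ++ PySem.Int.toStr duration_val

-- ===== PORT B =====
def convert_to_lilypond_alt (pitch_val : Int) (duration_val : Int) : String :=
  if pitch_val < 0 ∨ pitch_val > 51 then "r" ++ PySem.Int.toStr duration_val
  else
    -- "abcdefg"[pitch_val % 7]; the index is in range, so the 'none' arm is unreachable
    let letter : String := match PySem.Str.pyGet? "abcdefg" (PySem.Int.mod pitch_val 7) with
      | some c => String.ofList [c]
      | none => ""
    let octave : Int := PySem.Int.floordiv (pitch_val + 5) 7
    -- "," * (3 - octave) if octave < 3 else "'" * (octave - 3)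
    let suffix : String := if octave < 3 then String.ofList (List.replicate (3 - octave).toNat ',')
                           else String.ofList (List.replicate (octave - 3).toNat '\'')
    letter ++ suffix ++ PySem.Int.toStr duration_val

-- ===== PRECONDITION & SPEC =====
def Spec_convert_to_lilypond (pitch_val : Int) (duration_val : Int) (out : String) : Prop := out = convert_to_lilypond_alt pitch_val duration_val
instance (pitch_val : Int) (duration_val : Int) (out : String) : Decidable (Spec_convert_to_lilypond pitch_val duration_val out) := by unfold Spec_convert_to_lilypond; infer_instance

-- ===== CLAIM (what is proved, stated in full; the proofs are below) =====
def Claim_equal_convert_to_lilypond : Prop := ∀ (pitch_val : Int) (duration_val : Int), Dom_convert_to_lilypond pitch_val duration_val → Spec_convert_to_lilypond pitch_val duration_val (convert_to_lilypond pitch_val duration_val)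

-- ===== LEMMAS AND PROOFS =====

-- ===== VERDICT (by name: the statement is the Claim_ definition above) =====
theorem convert_to_lilypond_spec : Claim_equal_convert_to_lilypond := by
  intro p d _
  unfold Spec_convert_to_lilypond convert_to_lilypond convert_to_lilypond_alt
  split_ifs with h
  · rfl
  · rw [not_or, not_lt, not_lt] at h
    obtain ⟨h1, h2⟩ := h
    interval_cases p <;> rfl
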